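-- pv_equiv track=rewrite | github.com/holdercp/advent-of-code-2021 | 23/part_1.py | add_hallway_graph
-- ===== SOURCE A (Python) =====
-- def add_hallway_graph(graph):
--     for i in range(1, 12):
--         loc = f'H{i}'
--         graph[loc] = {}
--
--         neighbors = []
--         room_type = loc[0]
--         room_num = loc[1:]
--         if i > 1:
--             neighbors.append(f'{room_type}{int(room_num) - 1}')
--         if i < 11:
--             neighbors.append(f'{room_type}{int(room_num) + 1}')
--
--         if i == 3:
--             neighbors.append('A1')
--         if i == 5:
--             neighbors.append('B1')
--         if i == 7:
--             neighbors.append('C1')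
--         if i == 9:
--             neighbors.append('D1')
--         graph[loc] = neighbors
--
--     return graph
-- ===== SOURCE B (Python) =====
-- def add_hallway_graph(graph):
--     graph.update({
--         'H1': ['H2'],
--         'H2': ['H1', 'H3'],
--         'H3': ['H2', 'H4', 'A1'],
--         'H4': ['H3', 'H5'],
--         'H5': ['H4', 'H6', 'B1'],
--         'H6': ['H5', 'H7'],
--         'H7': ['H6', 'H8', 'C1'],
--         'H8': ['H7', 'H9'],
--         'H9': ['H8', 'H10', 'D1'],
--         'H10': ['H9', 'H11'],
--         'H11': ['H10'],
--     })
--     return graph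
-- ===== Notes on version B (the rewrite author's own statement) =====
-- stated objective: simpler
-- what changed: Replaced the range(1,12) loop that derives each hallway node's name and neighbors via f-strings and int() arithmetic with a single dict.update from a hardcoded literal adjacency table.
import Mathlib
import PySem

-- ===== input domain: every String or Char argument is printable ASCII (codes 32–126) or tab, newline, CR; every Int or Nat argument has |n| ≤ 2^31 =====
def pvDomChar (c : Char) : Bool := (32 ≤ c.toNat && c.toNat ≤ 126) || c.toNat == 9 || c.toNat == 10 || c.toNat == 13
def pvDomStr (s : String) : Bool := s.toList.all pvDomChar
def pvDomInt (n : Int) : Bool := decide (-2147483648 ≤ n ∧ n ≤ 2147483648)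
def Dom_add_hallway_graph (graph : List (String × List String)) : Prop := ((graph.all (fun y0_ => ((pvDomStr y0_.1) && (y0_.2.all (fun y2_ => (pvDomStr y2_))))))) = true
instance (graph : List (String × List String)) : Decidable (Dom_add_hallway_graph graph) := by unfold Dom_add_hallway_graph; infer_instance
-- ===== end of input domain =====

-- B replaces A's index loop (f-strings + int() arithmetic) by a single dict.update with the
-- hardcoded hallway adjacency table: simpler, no string arithmetic. Both A and B mutate the
-- passed-in dict and return it; the equivalence proved here is about the returned value.

-- ===== PORT A =====
-- the pure part of one iteration of A's 'for i in range(1, 12)': the node name loc = f'H{i}'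
-- and its neighbor list, computed exactly as A does (slice loc, re-parse with int(), format back)
def pvLocNbrs (i : Int) : String × List String :=
  let loc : String := String.ofList ('H' :: PySem.Int.toChars i)                 -- f'H{i}'
  let room_type : List Char := (PySem.List.pyGet? loc.toList 0).elim [] ([·])    -- loc[0] (loc nonempty: never IndexError)
  let room_num : List Char := PySem.List.slice loc.toList (some 1) none          -- loc[1:]
  let n : Int := (PySem.Int.ofChars? room_num).getD 0                            -- int(room_num); digits of i: never ValueError
  let neighbors : List String := []
  let neighbors := if 1 < i then neighbors ++ [String.ofList (room_type ++ PySem.Int.toChars (n - 1))] else neighbors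
  let neighbors := if i < 11 then neighbors ++ [String.ofList (room_type ++ PySem.Int.toChars (n + 1))] else neighbors
  let neighbors := if i = 3 then neighbors ++ ["A1"] else neighbors
  let neighbors := if i = 5 then neighbors ++ ["B1"] else neighbors
  let neighbors := if i = 7 then neighbors ++ ["C1"] else neighbors
  let neighbors := if i = 9 then neighbors ++ ["D1"] else neighbors
  (loc, neighbors)

-- one loop iteration: graph[loc] = {} (placeholder), then graph[loc] = neighbors
def pvStepA (d : PySem.Dict String (List String)) (i : Int) : PySem.Dict String (List String) :=
  let p := pvLocNbrs i
  ((d.insert p.1 []).insert p.1 p.2)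

def add_hallway_graph (graph : List (String × List String)) : List (String × List String) :=
  ((PySem.List.pyRange 1 12 1).foldl pvStepA (PySem.Dict.mk graph)).items

-- ===== PORT B =====
def pvHallwayEdges : List (String × List String) :=
  [("H1", ["H2"]), ("H2", ["H1", "H3"]), ("H3", ["H2", "H4", "A1"]), ("H4", ["H3", "H5"]),
   ("H5", ["H4", "H6", "B1"]), ("H6", ["H5", "H7"]), ("H7", ["H6", "H8", "C1"]),
   ("H8", ["H7", "H9"]), ("H9", ["H8", "H10", "D1"]), ("H10", ["H9", "H11"]), ("H11", ["H10"])]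

def add_hallway_graph_alt (graph : List (String × List String)) : List (String × List String) :=
  ((PySem.Dict.mk graph).update pvHallwayEdges).items

-- ===== PRECONDITION & SPEC =====
def Spec_add_hallway_graph (graph : List (String × List String)) (out : List (String × List String)) : Prop := out = add_hallway_graph_alt graph
instance (graph : List (String × List String)) (out : List (String × List String)) : Decidable (Spec_add_hallway_graph graph out) := by unfold Spec_add_hallway_graph; infer_instance

-- ===== CLAIM (what is proved, stated in full; the proofs are below) =====
def Claim_equal_add_hallway_graph : Prop := ∀ (graph : List (String × List String)), Dom_add_hallway_graph graph → Spec_add_hallway_graph graph (add_hallway_graph graph)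

-- ===== LEMMAS AND PROOFS =====
theorem pvFoldEqUpdate (d : PySem.Dict String (List String)) :
    (PySem.List.pyRange 1 12 1).foldl pvStepA d = d.update pvHallwayEdges := by
  have e1 : pvLocNbrs 1 = ("H1", ["H2"]) := by decide
  have e2 : pvLocNbrs 2 = ("H2", ["H1", "H3"]) := by decide
  have e3 : pvLocNbrs 3 = ("H3", ["H2", "H4", "A1"]) := by decide
  have e4 : pvLocNbrs 4 = ("H4", ["H3", "H5"]) := by decide
  have e5 : pvLocNbrs 5 = ("H5", ["H4", "H6", "B1"]) := by decide
  have e6 : pvLocNbrs 6 = ("H6", ["H5", "H7"]) := by decide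
  have e7 : pvLocNbrs 7 = ("H7", ["H6", "H8", "C1"]) := by decide
  have e8 : pvLocNbrs 8 = ("H8", ["H7", "H9"]) := by decide
  have e9 : pvLocNbrs 9 = ("H9", ["H8", "H10", "D1"]) := by decide
  have e10 : pvLocNbrs 10 = ("H10", ["H9", "H11"]) := by decide
  have e11 : pvLocNbrs 11 = ("H11", ["H10"]) := by decide
  have hr : PySem.List.pyRange 1 12 1 = [1, 2, 3, 4, 5, 6, 7, 8, 9, 10, 11] := by decide
  rw [hr]
  simp only [List.foldl, pvStepA, e1, e2, e3, e4, e5, e6, e7, e8, e9, e10, e11,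
    PySem.Dict.insert_insert_self]
  simp only [PySem.Dict.update, pvHallwayEdges, List.foldl]

-- ===== VERDICT (by name: the statement is the Claim_ definition above) =====
theorem add_hallway_graph_spec : Claim_equal_add_hallway_graph := by
  intro graph _
  unfold Spec_add_hallway_graph add_hallway_graph add_hallway_graph_alt
  rw [pvFoldEqUpdate]
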